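-- pv_equiv track=rewrite | github.com/sylvia-griffin/creating_a_game_with_python | crossword_game/src/planets.py | get_word_at_cell
-- ===== SOURCE A (Python) =====
-- answers = [
--     ("MARS", 0, 2, "across"),
--     ("NEPTUNE", 2, 0, "across"),
--     ("JUPITER", 5, 0, "across"),
--     ("SATURN", 9, 6, "across"),
--     ("SUN", 0, 5, "down"),
--     ("MERCURY", 1, 1, "down"),
--     ("URANUS", 4, 6, "down"),
--     ("EARTH", 6, 8, "down"),
--     ("VENUS", 7, 11, "down"),
-- ]
--
-- def get_word_at_cell(row, col):
--     for word, start_row, start_col, direction in answers: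
--         for i in range(len(word)):
--             r = start_row + i if direction == "down" else start_row
--             c = start_col + i if direction == "across" else start_col
--             if r == row and c == col:
--                 return word, start_row, start_col, direction
--     return None
-- ===== SOURCE B (Python) =====
-- answers = [
--     ("MARS", 0, 2, "across"),
--     ("NEPTUNE", 2, 0, "across"),
--     ("JUPITER", 5, 0, "across"),
--     ("SATURN", 9, 6, "across"),
--     ("SUN", 0, 5, "down"),
--     ("MERCURY", 1, 1, "down"),
--     ("URANUS", 4, 6, "down"),
--     ("EARTH", 6, 8, "down"),
--     ("VENUS", 7, 11, "down"),
-- ]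
--
-- def _build_index():
--     idx = {}
--     for word, start_row, start_col, direction in answers:
--         for i in range(len(word)):
--             r = start_row + i if direction == "down" else start_row
--             c = start_col + i if direction == "across" else start_col
--             idx.setdefault((r, c), (word, start_row, start_col, direction))
--     return idx
--
-- _INDEX = _build_index()
--
-- def get_word_at_cell(row, col):
--     return _INDEX.get((row, col))
-- ===== Notes on version B (the rewrite author's own statement) =====
-- stated objective: idiomatic
-- what changed: Builds a (row,col) -> answer dict once (setdefault keeps the first answer in list order for crossing cells); each call is then a single dict lookup instead of a nested scan over every answer's cells.
import Mathlib
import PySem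

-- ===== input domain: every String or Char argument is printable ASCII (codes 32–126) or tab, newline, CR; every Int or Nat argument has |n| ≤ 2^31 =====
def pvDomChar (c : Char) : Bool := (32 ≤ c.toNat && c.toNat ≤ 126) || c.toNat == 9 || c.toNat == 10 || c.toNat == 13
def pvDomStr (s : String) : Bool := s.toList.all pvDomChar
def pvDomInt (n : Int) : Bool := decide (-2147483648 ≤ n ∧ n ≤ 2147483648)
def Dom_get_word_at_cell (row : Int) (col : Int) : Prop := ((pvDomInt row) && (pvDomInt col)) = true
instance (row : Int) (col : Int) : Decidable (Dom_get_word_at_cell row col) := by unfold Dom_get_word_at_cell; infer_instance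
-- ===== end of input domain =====

-- B builds a (row,col) -> answer index dict once (setdefault: first answer in list order wins
-- on crossing cells) and answers each query by a single dict lookup instead of A's nested scan.

-- the module-level `answers` constant shared by both versions
def answers : List (String × Int × Int × String) :=
  [("MARS", 0, 2, "across"),
   ("NEPTUNE", 2, 0, "across"),
   ("JUPITER", 5, 0, "across"),
   ("SATURN", 9, 6, "across"),
   ("SUN", 0, 5, "down"),
   ("MERCURY", 1, 1, "down"),
   ("URANUS", 4, 6, "down"),
   ("EARTH", 6, 8, "down"),
   ("VENUS", 7, 11, "down")]

-- ===== PORT A =====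
-- inner `for i in range(len(word))` loop with early return
def gwacInner (row col : Int) (word : String) (sr sc : Int) (dir : String) :
    List Int → Option (String × Int × Int × String)
  | [] => none
  | i :: rest =>
    let r := if dir == "down" then sr + i else sr
    let c := if dir == "across" then sc + i else sc
    if r = row ∧ c = col then some (word, sr, sc, dir)
    else gwacInner row col word sr sc dir rest

-- outer `for word, start_row, start_col, direction in answers` loop
def gwacOuter (row col : Int) : List (String × Int × Int × String) → Option (String × Int × Int × String)
  | [] => none
  | (w, sr, sc, d) :: rest =>
    match gwacInner row col w sr sc d (PySem.List.pyRange 0 (PySem.Str.len w) 1) with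
    | some v => some v
    | none => gwacOuter row col rest

def get_word_at_cell (row : Int) (col : Int) : Option (String × Int × Int × String) :=
  gwacOuter row col answers

-- ===== PORT B =====
-- _build_index: fold over answers, setdefault each covered cell
def gwacIndex : PySem.Dict (Int × Int) (String × Int × Int × String) :=
  answers.foldl
    (fun idx e =>
      let (w, sr, sc, d) := e
      (PySem.List.pyRange 0 (PySem.Str.len w) 1).foldl
        (fun idx i =>
          let r := if d == "down" then sr + i else sr
          let c := if d == "across" then sc + i else sc
          idx.setdefault (r, c) (w, sr, sc, d))
        idx)
    PySem.Dict.empty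

def get_word_at_cell_alt (row : Int) (col : Int) : Option (String × Int × Int × String) :=
  gwacIndex.get? (row, col)

-- ===== PRECONDITION & SPEC =====
def Spec_get_word_at_cell (row : Int) (col : Int) (out : Option (String × Int × Int × String)) : Prop := out = get_word_at_cell_alt row col
instance (row : Int) (col : Int) (out : Option (String × Int × Int × String)) : Decidable (Spec_get_word_at_cell row col out) := by unfold Spec_get_word_at_cell; infer_instance

-- ===== CLAIM (what is proved, stated in full; the proofs are below) =====
def Claim_equal_get_word_at_cell : Prop := ∀ (row : Int) (col : Int), Dom_get_word_at_cell row col → Spec_get_word_at_cell row col (get_word_at_cell row col)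

-- ===== LEMMAS AND PROOFS =====

lemma inner_none (row col : Int) (w : String) (sr sc : Int) (d : String) (cells : List Int)
    (h : ∀ i ∈ cells, ¬((if d == "down" then sr + i else sr) = row ∧ (if d == "across" then sc + i else sc) = col)) :
    gwacInner row col w sr sc d cells = none := by
  induction cells with
  | nil => rfl
  | cons i rest ih =>
    simp only [gwacInner]
    rw [if_neg (h i (List.mem_cons_self))]
    exact ih (fun j hj => h j (List.mem_cons_of_mem _ hj))

lemma outer_none (row col : Int) (l : List (String × Int × Int × String))
    (h : ∀ e ∈ l, gwacInner row col e.1 e.2.1 e.2.2.1 e.2.2.2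
        (PySem.List.pyRange 0 (PySem.Str.len e.1) 1) = none) :
    gwacOuter row col l = none := by
  induction l with
  | nil => rfl
  | cons e rest ih =>
    obtain ⟨w, sr, sc, d⟩ := e
    simp only [gwacOuter]
    rw [h (w, sr, sc, d) List.mem_cons_self]
    exact ih (fun e he => h e (List.mem_cons_of_mem _ he))

-- outside the 12x12 grid region neither version finds a cell
lemma A_none (row col : Int) (h : ¬ (0 ≤ row ∧ row ≤ 11 ∧ 0 ≤ col ∧ col ≤ 11)) :
    get_word_at_cell row col = none := by
  unfold get_word_at_cell answers
  apply outer_none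
  intro e he
  simp only [List.mem_cons, List.not_mem_nil, or_false] at he
  rcases he with rfl|rfl|rfl|rfl|rfl|rfl|rfl|rfl|rfl <;>
  · apply inner_none
    intro i hi
    simp only [show PySem.Str.len "MARS" = 4 from rfl, show PySem.Str.len "NEPTUNE" = 7 from rfl,
      show PySem.Str.len "JUPITER" = 7 from rfl, show PySem.Str.len "SATURN" = 6 from rfl,
      show PySem.Str.len "SUN" = 3 from rfl, show PySem.Str.len "MERCURY" = 7 from rfl,
      show PySem.Str.len "URANUS" = 6 from rfl, show PySem.Str.len "EARTH" = 5 from rfl,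
      show PySem.Str.len "VENUS" = 5 from rfl] at hi
    simp only [show PySem.List.pyRange 0 3 1 = [0,1,2] from rfl,
      show PySem.List.pyRange 0 4 1 = [0,1,2,3] from rfl,
      show PySem.List.pyRange 0 5 1 = [0,1,2,3,4] from rfl,
      show PySem.List.pyRange 0 6 1 = [0,1,2,3,4,5] from rfl,
      show PySem.List.pyRange 0 7 1 = [0,1,2,3,4,5,6] from rfl,
      List.mem_cons, List.not_mem_nil, or_false] at hi
    rcases hi with rfl|rfl|rfl|rfl|rfl|rfl|rfl <;> norm_num <;> (try split_ifs) <;> first | omega | simp_all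

lemma mk_get?_none (k : Int × Int) (ps : List ((Int × Int) × (String × Int × Int × String)))
    (h : ∀ p ∈ ps, p.1 ≠ k) : (PySem.Dict.mk ps).get? k = none := by
  induction ps with
  | nil => rfl
  | cons p rest ih =>
    rcases p with ⟨pk, pv⟩
    rw [PySem.Dict.get?_mk_cons, if_neg (by simpa using h (pk, pv) List.mem_cons_self)]
    exact ih (fun q hq => h q (List.mem_cons_of_mem _ hq))

set_option maxRecDepth 10000 in
set_option maxHeartbeats 2000000 in
lemma B_none (row col : Int) (h : ¬ (0 ≤ row ∧ row ≤ 11 ∧ 0 ≤ col ∧ col ≤ 11)) :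
    get_word_at_cell_alt row col = none := by
  unfold get_word_at_cell_alt
  rw [show gwacIndex = PySem.Dict.mk [((0, 2), ("MARS", 0, 2, "across")), ((0, 3), ("MARS", 0, 2, "across")), ((0, 4), ("MARS", 0, 2, "across")), ((0, 5), ("MARS", 0, 2, "across")), ((2, 0), ("NEPTUNE", 2, 0, "across")), ((2, 1), ("NEPTUNE", 2, 0, "across")), ((2, 2), ("NEPTUNE", 2, 0, "across")), ((2, 3), ("NEPTUNE", 2, 0, "across")), ((2, 4), ("NEPTUNE", 2, 0, "across")), ((2, 5), ("NEPTUNE", 2, 0, "across")), ((2, 6), ("NEPTUNE", 2, 0, "across")), ((5, 0), ("JUPITER", 5, 0, "across")), ((5, 1), ("JUPITER", 5, 0, "across")), ((5, 2), ("JUPITER", 5, 0, "across")), ((5, 3), ("JUPITER", 5, 0, "across")), ((5, 4), ("JUPITER", 5, 0, "across")), ((5, 5), ("JUPITER", 5, 0, "across")), ((5, 6), ("JUPITER", 5, 0, "across")), ((9, 6), ("SATURN", 9, 6, "across")), ((9, 7), ("SATURN", 9, 6, "across")), ((9, 8), ("SATURN", 9, 6, "across")), ((9, 9), ("SATURN",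 9, 6, "across")), ((9, 10), ("SATURN", 9, 6, "across")), ((9, 11), ("SATURN", 9, 6, "across")), ((1, 5), ("SUN", 0, 5, "down")), ((1, 1), ("MERCURY", 1, 1, "down")), ((3, 1), ("MERCURY", 1, 1, "down")), ((4, 1), ("MERCURY", 1, 1, "down")), ((6, 1), ("MERCURY", 1, 1, "down")), ((7, 1), ("MERCURY", 1, 1, "down")), ((4, 6), ("URANUS", 4, 6, "down")), ((6, 6), ("URANUS", 4, 6, "down")), ((7, 6), ("URANUS", 4, 6, "down")), ((8, 6), ("URANUS", 4, 6, "down")), ((6, 8), ("EARTH", 6, 8, "down")), ((7, 8), ("EARTH", 6, 8, "down")), ((8, 8), ("EARTH", 6, 8, "down")), ((10, 8), ("EARTH", 6, 8, "down")), ((7, 11), ("VENUS", 7, 11, "down")), ((8, 11), ("VENUS", 7, 11, "down")), ((10, 11), ("VENUS", 7, 11, "down")), ((11, 11), ("VENUS", 7, 11, "down"))] from rfl]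
  apply mk_get?_none
  intro p hp
  simp only [List.mem_cons, List.not_mem_nil, or_false] at hp
  rcases hp with rfl|rfl|rfl|rfl|rfl|rfl|rfl|rfl|rfl|rfl|rfl|rfl|rfl|rfl|rfl|rfl|rfl|rfl|rfl|rfl|rfl|rfl|rfl|rfl|rfl|rfl|rfl|rfl|rfl|rfl|rfl|rfl|rfl|rfl|rfl|rfl|rfl|rfl|rfl|rfl|rfl|rfl <;> simp only [ne_eq, Prod.mk.injEq, not_and] <;> omega

-- ===== VERDICT (by name: the statement is the Claim_ definition above) =====
set_option maxRecDepth 10000 in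
set_option maxHeartbeats 2000000 in
theorem get_word_at_cell_spec : Claim_equal_get_word_at_cell := by
  intro row col _
  unfold Spec_get_word_at_cell
  by_cases h : 0 ≤ row ∧ row ≤ 11 ∧ 0 ≤ col ∧ col ≤ 11
  · obtain ⟨h1, h2, h3, h4⟩ := h
    interval_cases row <;> interval_cases col <;> decide
  · rw [A_none row col h, B_none row col h]
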